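-- pv_equiv track=rewrite | github.com/WenddHe0119/Werewolf | src/utils.py | role_list_from_config
-- ===== SOURCE A (Python) =====
-- from typing import Dict, List, Tuple
--
-- CANONICAL_ROLE_ORDER = ["werewolf", "seer", "witch", "villager"]
--
-- def role_list_from_config(role_config: Dict[str, int]) -> List[str]:
--     roles: List[str] = []
--     for role in CANONICAL_ROLE_ORDER:
--         roles.extend([role] * role_config.get(role, 0))
--     for role, count in role_config.items():
--         if role not in CANONICAL_ROLE_ORDER:
--             roles.extend([role] * count)
--     return roles
-- ===== SOURCE B (Python) =====
-- from typing import Dict, List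
--
-- CANONICAL_ROLE_ORDER = ["werewolf", "seer", "witch", "villager"]
--
-- def role_list_from_config(role_config: Dict[str, int]) -> List[str]:
--     n = len(CANONICAL_ROLE_ORDER)
--     def rank(role):
--         return CANONICAL_ROLE_ORDER.index(role) if role in CANONICAL_ROLE_ORDER else n
--     out: List[str] = []
--     for role, count in sorted(role_config.items(), key=lambda kv: rank(kv[0])):
--         out += [role] * count
--     return out
-- ===== Notes on version B (the rewrite author's own statement) =====
-- stated objective: alternative
-- what changed: Replaces A's two separate passes (one scan per canonical role via get, then a filtering pass for the rest) by a single stable sort of the items keyed on canonical rank followed by one expansion pass.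
import Mathlib
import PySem

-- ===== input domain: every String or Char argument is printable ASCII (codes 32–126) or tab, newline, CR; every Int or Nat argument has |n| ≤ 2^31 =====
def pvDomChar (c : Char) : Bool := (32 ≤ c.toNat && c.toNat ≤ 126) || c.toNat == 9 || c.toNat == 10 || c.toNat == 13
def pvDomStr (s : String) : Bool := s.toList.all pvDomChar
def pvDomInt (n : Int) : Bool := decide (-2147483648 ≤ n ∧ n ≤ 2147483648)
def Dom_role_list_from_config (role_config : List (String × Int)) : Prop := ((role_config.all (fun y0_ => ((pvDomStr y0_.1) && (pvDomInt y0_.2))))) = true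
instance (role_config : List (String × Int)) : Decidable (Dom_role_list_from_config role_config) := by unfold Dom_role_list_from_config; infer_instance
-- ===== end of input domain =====

-- B replaces A's two passes (canonical roles via get, then a filtering pass for the
-- rest) by one stable sort of the items keyed on canonical rank plus one expansion pass.

-- shared module constant
def CANONICAL_ROLE_ORDER : List String := ["werewolf", "seer", "witch", "villager"]

-- ===== PORT A =====
def role_list_from_config (role_config : List (String × Int)) : List String :=
  -- first loop: for role in CANONICAL_ROLE_ORDER: roles.extend([role] * role_config.get(role, 0))
  let roles : List String :=
    CANONICAL_ROLE_ORDER.foldl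
      (fun acc role => acc ++ PySem.List.pyRepeat [role] ((PySem.Dict.mk role_config).getD role 0)) []
  -- second loop: for role, count in role_config.items(): if role not in CANONICAL_ROLE_ORDER: …
  role_config.foldl
    (fun acc kv => if CANONICAL_ROLE_ORDER.contains kv.1 then acc
                   else acc ++ PySem.List.pyRepeat [kv.1] kv.2) roles

-- ===== PORT B =====
-- rank(role) = CANONICAL_ROLE_ORDER.index(role) if role in CANONICAL_ROLE_ORDER else n
def pvRankB (role : String) : Nat :=
  if CANONICAL_ROLE_ORDER.contains role then (PySem.List.index? CANONICAL_ROLE_ORDER role).getD 0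
  else CANONICAL_ROLE_ORDER.length

def role_list_from_config_alt (role_config : List (String × Int)) : List String :=
  (PySem.List.sorted role_config (fun kv => pvRankB kv.1) false).foldl
    (fun out kv => out ++ PySem.List.pyRepeat [kv.1] kv.2) []

-- ===== PRECONDITION & SPEC =====
-- Pre_ excludes association lists with duplicate keys: they cannot arise from A's Python
-- dict argument (dict keys are unique), so on such lists A's first-match get and B's
-- per-occurrence expansion are both accidental readings of a non-dict input.
def Pre_role_list_from_config (role_config : List (String × Int)) : Prop :=
  (role_config.map Prod.fst).Nodup
instance (role_config : List (String × Int)) : Decidable (Pre_role_list_from_config role_config) := by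
  unfold Pre_role_list_from_config; infer_instance

def pvWitness_role_list_from_config : (List (String × Int)) :=
  [("guard", 1), ("werewolf", 2), ("villager", 3)]

def Spec_role_list_from_config (role_config : List (String × Int)) (out : List String) : Prop := out = role_list_from_config_alt role_config
instance (role_config : List (String × Int)) (out : List String) : Decidable (Spec_role_list_from_config role_config out) := by unfold Spec_role_list_from_config; infer_instance

-- ===== CLAIM (what is proved, stated in full; the proofs are below) =====
def Claim_equal_role_list_from_config : Prop := ∀ (role_config : List (String × Int)), Dom_role_list_from_config role_config → Pre_role_list_from_config role_config → Spec_role_list_from_config role_config (role_list_from_config role_config)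

-- ===== LEMMAS AND PROOFS =====

-- a plain case tree for B's rank key
def pvRankF (role : String) : Nat :=
  if role = "werewolf" then 0 else if role = "seer" then 1
  else if role = "witch" then 2 else if role = "villager" then 3 else 4

theorem pvRankB_eq (r : String) : pvRankB r = pvRankF r := by
  by_cases h0 : r = "werewolf" <;> by_cases h1 : r = "seer" <;> by_cases h2 : r = "witch" <;>
    by_cases h3 : r = "villager" <;>
  simp_all [pvRankB, pvRankF, CANONICAL_ROLE_ORDER, PySem.List.index?, List.idxOf?, List.findIdx?] <;>
  decide

theorem pvRank_lt_five (r : String) : pvRankB r < 5 := by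
  rw [pvRankB_eq]; unfold pvRankF; split_ifs <;> omega

theorem pvContains_iff (r : String) : CANONICAL_ROLE_ORDER.contains r = !(pvRankB r == 4) := by
  rw [pvRankB_eq]
  by_cases h0 : r = "werewolf" <;> by_cases h1 : r = "seer" <;> by_cases h2 : r = "witch" <;>
    by_cases h3 : r = "villager" <;>
  simp_all [pvRankF, CANONICAL_ROLE_ORDER]

theorem pvRank_eq_iff (r : String) (i : Nat) (hi : i < 4) :
    (pvRankB r == i) = (r == CANONICAL_ROLE_ORDER[i]!) := by
  rw [pvRankB_eq]
  interval_cases i <;>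
  · by_cases h0 : r = "werewolf" <;> by_cases h1 : r = "seer" <;> by_cases h2 : r = "witch" <;>
      by_cases h3 : r = "villager" <;>
    simp_all [pvRankF, CANONICAL_ROLE_ORDER]

-- the per-occurrence expansion both ports perform
def pvExpand (kv : String × Int) : List String := List.replicate kv.2.toNat kv.1

-- insertBy walks past a prefix it does not go before
theorem pvInsertBy_skip {α : Type} (before : α → α → Bool) (x : α) (l₁ l₂ : List α)
    (h : ∀ a ∈ l₁, before x a = false) :
    PySem.List.insertBy before x (l₁ ++ l₂) = l₁ ++ PySem.List.insertBy before x l₂ := by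
  induction l₁ with
  | nil => simp
  | cons a t ih =>
      simp only [List.cons_append, PySem.List.insertBy, h a (by simp)]
      simp [ih (fun b hb => h b (by simp [hb]))]

-- insertBy stops at the head of a block it goes before
theorem pvInsertBy_head {α : Type} (before : α → α → Bool) (x : α) (l : List α)
    (h : ∀ a ∈ l, before x a = true) :
    PySem.List.insertBy before x l = x :: l := by
  cases l with
  | nil => rfl
  | cons a t => simp [PySem.List.insertBy, h a (by simp)]

theorem pvInsert_mid (x : String × Int) (l₁ l₂ : List (String × Int))
    (h1 : ∀ a ∈ l₁, ¬ pvRankB x.1 < pvRankB a.1) (h2 : ∀ a ∈ l₂, pvRankB x.1 < pvRankB a.1) :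
    PySem.List.insertBy (fun a b => decide (pvRankB a.1 < pvRankB b.1)) x (l₁ ++ l₂)
      = l₁ ++ x :: l₂ := by
  rw [pvInsertBy_skip _ _ _ _ (fun a ha => by simpa using h1 a ha),
      pvInsertBy_head _ _ _ (fun a ha => by simpa using h2 a ha)]

def pvBlk (rc : List (String × Int)) (i : Nat) : List (String × Int) :=
  rc.filter (fun kv => pvRankB kv.1 == i)

theorem pvSorted_blocks (rc : List (String × Int)) :
    PySem.List.sorted rc (fun kv => pvRankB kv.1) false
      = pvBlk rc 0 ++ pvBlk rc 1 ++ pvBlk rc 2 ++ pvBlk rc 3 ++ pvBlk rc 4 := by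
  induction rc using List.reverseRecOn with
  | nil => rfl
  | append_singleton xs x ih =>
      have hstep : PySem.List.sorted (xs ++ [x]) (fun kv => pvRankB kv.1) false
          = PySem.List.insertBy (fun a b => decide (pvRankB a.1 < pvRankB b.1)) x
              (PySem.List.sorted xs (fun kv => pvRankB kv.1) false) := by
        rw [PySem.List.sorted_eq_foldl_insertBy, PySem.List.sorted_eq_foldl_insertBy,
            List.foldl_append]
        rfl
      have hblkmem : ∀ i : Nat, ∀ a ∈ pvBlk xs i, pvRankB a.1 = i := by
        intro i a ha
        simpa using List.of_mem_filter ha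
      have hblk : ∀ i : Nat, pvBlk (xs ++ [x]) i
          = pvBlk xs i ++ (if pvRankB x.1 = i then [x] else []) := by
        intro i
        by_cases hc : pvRankB x.1 = i <;> simp [pvBlk, List.filter_append, hc]
      have hx5 := pvRank_lt_five x.1
      rw [hstep, ih]
      interval_cases h : pvRankB x.1
      · simp only [hblk]
        have h1 : ∀ a ∈ (pvBlk xs 0), ¬ pvRankB x.1 < pvRankB a.1 := by
          intro a ha
          rw [h]
          first
            | (have := hblkmem 0 a ha; omega)
            | (have := hblkmem 1 a ha; omega)
            | (have := hblkmem 2 a ha; omega)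
            | (have := hblkmem 3 a ha; omega)
            | (have := hblkmem 4 a ha; omega)
        have h2 : ∀ a ∈ (pvBlk xs 1 ++ pvBlk xs 2 ++ pvBlk xs 3 ++ pvBlk xs 4), pvRankB x.1 < pvRankB a.1 := by
          intro a ha
          simp only [List.mem_append, or_assoc] at ha
          rw [h]
          rcases ha with h0|h0|h0|h0
          all_goals first
            | (have := hblkmem 0 a h0; omega)
            | (have := hblkmem 1 a h0; omega)
            | (have := hblkmem 2 a h0; omega)
            | (have := hblkmem 3 a h0; omega)
            | (have := hblkmem 4 a h0; omega)
        have hmid := pvInsert_mid x (pvBlk xs 0) (pvBlk xs 1 ++ pvBlk xs 2 ++ pvBlk xs 3 ++ pvBlk xs 4) h1 h2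
        simpa [List.append_assoc] using hmid
      · simp only [hblk]
        have h1 : ∀ a ∈ (pvBlk xs 0 ++ pvBlk xs 1), ¬ pvRankB x.1 < pvRankB a.1 := by
          intro a ha
          simp only [List.mem_append, or_assoc] at ha
          rw [h]
          rcases ha with h0|h0
          all_goals first
            | (have := hblkmem 0 a h0; omega)
            | (have := hblkmem 1 a h0; omega)
            | (have := hblkmem 2 a h0; omega)
            | (have := hblkmem 3 a h0; omega)
            | (have := hblkmem 4 a h0; omega)
        have h2 : ∀ a ∈ (pvBlk xs 2 ++ pvBlk xs 3 ++ pvBlk xs 4), pvRankB x.1 < pvRankB a.1 := by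
          intro a ha
          simp only [List.mem_append, or_assoc] at ha
          rw [h]
          rcases ha with h0|h0|h0
          all_goals first
            | (have := hblkmem 0 a h0; omega)
            | (have := hblkmem 1 a h0; omega)
            | (have := hblkmem 2 a h0; omega)
            | (have := hblkmem 3 a h0; omega)
            | (have := hblkmem 4 a h0; omega)
        have hmid := pvInsert_mid x (pvBlk xs 0 ++ pvBlk xs 1) (pvBlk xs 2 ++ pvBlk xs 3 ++ pvBlk xs 4) h1 h2
        simpa [List.append_assoc] using hmid
      · simp only [hblk]
        have h1 : ∀ a ∈ (pvBlk xs 0 ++ pvBlk xs 1 ++ pvBlk xs 2), ¬ pvRankB x.1 < pvRankB a.1 := by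
          intro a ha
          simp only [List.mem_append, or_assoc] at ha
          rw [h]
          rcases ha with h0|h0|h0
          all_goals first
            | (have := hblkmem 0 a h0; omega)
            | (have := hblkmem 1 a h0; omega)
            | (have := hblkmem 2 a h0; omega)
            | (have := hblkmem 3 a h0; omega)
            | (have := hblkmem 4 a h0; omega)
        have h2 : ∀ a ∈ (pvBlk xs 3 ++ pvBlk xs 4), pvRankB x.1 < pvRankB a.1 := by
          intro a ha
          simp only [List.mem_append, or_assoc] at ha
          rw [h]
          rcases ha with h0|h0
          all_goals first
            | (have := hblkmem 0 a h0; omega)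
            | (have := hblkmem 1 a h0; omega)
            | (have := hblkmem 2 a h0; omega)
            | (have := hblkmem 3 a h0; omega)
            | (have := hblkmem 4 a h0; omega)
        have hmid := pvInsert_mid x (pvBlk xs 0 ++ pvBlk xs 1 ++ pvBlk xs 2) (pvBlk xs 3 ++ pvBlk xs 4) h1 h2
        simpa [List.append_assoc] using hmid
      · simp only [hblk]
        have h1 : ∀ a ∈ (pvBlk xs 0 ++ pvBlk xs 1 ++ pvBlk xs 2 ++ pvBlk xs 3), ¬ pvRankB x.1 < pvRankB a.1 := by
          intro a ha
          simp only [List.mem_append, or_assoc] at ha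
          rw [h]
          rcases ha with h0|h0|h0|h0
          all_goals first
            | (have := hblkmem 0 a h0; omega)
            | (have := hblkmem 1 a h0; omega)
            | (have := hblkmem 2 a h0; omega)
            | (have := hblkmem 3 a h0; omega)
            | (have := hblkmem 4 a h0; omega)
        have h2 : ∀ a ∈ (pvBlk xs 4), pvRankB x.1 < pvRankB a.1 := by
          intro a ha
          rw [h]
          first
            | (have := hblkmem 0 a ha; omega)
            | (have := hblkmem 1 a ha; omega)
            | (have := hblkmem 2 a ha; omega)
            | (have := hblkmem 3 a ha; omega)
            | (have := hblkmem 4 a ha; omega)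
        have hmid := pvInsert_mid x (pvBlk xs 0 ++ pvBlk xs 1 ++ pvBlk xs 2 ++ pvBlk xs 3) (pvBlk xs 4) h1 h2
        simpa [List.append_assoc] using hmid
      · simp only [hblk]
        have h1 : ∀ a ∈ (pvBlk xs 0 ++ pvBlk xs 1 ++ pvBlk xs 2 ++ pvBlk xs 3 ++ pvBlk xs 4), ¬ pvRankB x.1 < pvRankB a.1 := by
          intro a ha
          simp only [List.mem_append, or_assoc] at ha
          rw [h]
          rcases ha with h0|h0|h0|h0|h0
          all_goals first
            | (have := hblkmem 0 a h0; omega)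
            | (have := hblkmem 1 a h0; omega)
            | (have := hblkmem 2 a h0; omega)
            | (have := hblkmem 3 a h0; omega)
            | (have := hblkmem 4 a h0; omega)
        have h2 : ∀ a ∈ (([] : List (String × Int))), pvRankB x.1 < pvRankB a.1 := by
          intro a ha
          exact absurd ha (List.not_mem_nil)
        have hmid := pvInsert_mid x (pvBlk xs 0 ++ pvBlk xs 1 ++ pvBlk xs 2 ++ pvBlk xs 3 ++ pvBlk xs 4) (([] : List (String × Int))) h1 h2
        simpa [List.append_assoc] using hmid

-- first-match get expanded equals the flatMap of the matching filter block, given unique keys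
theorem pvGet_filter (rc : List (String × Int)) (r : String)
    (h : (rc.map Prod.fst).Nodup) :
    List.replicate ((PySem.Dict.mk rc).getD r 0).toNat r
      = (rc.filter (fun kv => kv.1 == r)).flatMap pvExpand := by
  induction rc with
  | nil => simp [PySem.Dict.getD, PySem.Dict.get?]
  | cons kv t ih =>
      obtain ⟨k, v⟩ := kv
      simp only [List.map_cons, List.nodup_cons] at h
      by_cases hk : k = r
      · subst hk
        have htf : t.filter (fun kv => kv.1 == k) = [] := by
          apply List.filter_eq_nil_iff.mpr
          intro a ha hb
          have ha1 : a.1 = k := by simpa using hb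
          exact h.1 (ha1 ▸ List.mem_map_of_mem (f := Prod.fst) ha)
        simp [PySem.Dict.getD, PySem.Dict.get?_mk_cons, htf, pvExpand]
      · have hb : (k == r) = false := by simp [hk]
        have ihh := ih h.2
        simp only [PySem.Dict.getD, PySem.Dict.get?_mk_cons, hb] at ihh ⊢
        simp only [List.filter_cons, hb]
        simpa [PySem.Dict.getD] using ihh

-- an extend loop is init ++ flatMap
theorem pvFoldl_extend (L : List (String × Int)) (init : List String) :
    L.foldl (fun out kv => out ++ PySem.List.pyRepeat [kv.1] kv.2) init
      = init ++ L.flatMap pvExpand := by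
  rw [← PySem.List.foldl_append_eq_flatMap (g := pvExpand) L init]
  exact PySem.List.foldl_congr_mem (l := L) (init := init)
    (f := fun out kv => out ++ PySem.List.pyRepeat [kv.1] kv.2)
    (g := fun acc x => acc ++ pvExpand x)
    (fun acc x _ => by simp [PySem.List.pyRepeat_singleton, pvExpand])

-- A's second loop is init ++ flatMap over the non-canonical filter
theorem pvFoldl_extras (rc : List (String × Int)) (init : List String) :
    rc.foldl (fun acc kv => if CANONICAL_ROLE_ORDER.contains kv.1 then acc
                            else acc ++ PySem.List.pyRepeat [kv.1] kv.2) init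
      = init ++ (rc.filter (fun kv => !CANONICAL_ROLE_ORDER.contains kv.1)).flatMap pvExpand := by
  have hcg := PySem.List.foldl_congr_mem (l := rc) (init := init)
    (f := fun acc kv => if CANONICAL_ROLE_ORDER.contains kv.1 then acc
                        else acc ++ PySem.List.pyRepeat [kv.1] kv.2)
    (g := fun acc kv => if !CANONICAL_ROLE_ORDER.contains kv.1
                        then acc ++ PySem.List.pyRepeat [kv.1] kv.2 else acc)
    (fun acc x _ => by by_cases hc : CANONICAL_ROLE_ORDER.contains x.1 = true <;> simp [hc])
  rw [hcg, PySem.List.foldl_if_eq_foldl_filter]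
  exact pvFoldl_extend _ init

-- canonical blocks are the single-key filters; block 4 is the non-canonical filter
theorem pvBlk_key (rc : List (String × Int)) (i : Nat) (hi : i < 4) :
    pvBlk rc i = rc.filter (fun kv => kv.1 == CANONICAL_ROLE_ORDER[i]!) := by
  unfold pvBlk
  exact List.filter_congr (fun kv _ => pvRank_eq_iff kv.1 i hi)

theorem pvBlk_extra (rc : List (String × Int)) :
    pvBlk rc 4 = rc.filter (fun kv => !CANONICAL_ROLE_ORDER.contains kv.1) := by
  unfold pvBlk
  exact List.filter_congr (fun kv _ => by rw [pvContains_iff]; simp)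

-- ===== VERDICT (by name: the statement is the Claim_ definition above) =====
theorem role_list_from_config_spec : Claim_equal_role_list_from_config := by
  intro rc _ hpre
  unfold Spec_role_list_from_config role_list_from_config role_list_from_config_alt
  rw [pvSorted_blocks, pvFoldl_extend]
  simp only [List.flatMap_append]
  have hcan : ∀ i : Nat, i < 4 →
      PySem.List.pyRepeat [CANONICAL_ROLE_ORDER[i]!] ((PySem.Dict.mk rc).getD CANONICAL_ROLE_ORDER[i]! 0)
        = (pvBlk rc i).flatMap pvExpand := by
    intro i hi
    rw [PySem.List.pyRepeat_singleton, pvBlk_key rc i hi]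
    exact pvGet_filter rc _ hpre
  have h0 := hcan 0 (by omega)
  have h1 := hcan 1 (by omega)
  have h2 := hcan 2 (by omega)
  have h3 := hcan 3 (by omega)
  simp only [CANONICAL_ROLE_ORDER, List.getElem!_cons_zero, List.getElem!_cons_succ] at h0 h1 h2 h3
  rw [pvFoldl_extras, ← pvBlk_extra]
  simp only [CANONICAL_ROLE_ORDER, List.foldl_cons, List.foldl_nil, List.nil_append]
  rw [h0, h1, h2, h3]
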